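-- pv_equiv track=rewrite | github.com/DaniFdezAlvarez/classrank | experimentation/query_mining/class_usage_miner.py | _detect_literal_spaces
-- ===== SOURCE A (Python) =====
-- def _detect_literal_spaces(str_query):
--     indexes = []
--     index = 0
--     for char in str_query:
--         if char == '"':
--             if index == 0:
--                 indexes.append(index)
--             elif str_query[index - 1] != '\\':
--                 indexes.append(index)
--         index += 1
--     if len(indexes) % 2 != 0:
--         raise ValueError("The query has an odd number of non-scaped quotes: " + str_query)
--     if len(indexes) == 0:
--         return []
--     result = []
--     i = 0
--     while i < len(indexes):
--         result.append((indexes[i], indexes[i + 1]))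
--         i += 2
--     return result
-- ===== SOURCE B (Python) =====
-- def _detect_literal_spaces(str_query):
--     # Single pass: track the previous character and the index of an unclosed
--     # opening quote; pair quotes as they are found instead of collecting all
--     # positions first and pairing in a second loop.
--     result = []
--     pending = None
--     prev = None
--     for i, ch in enumerate(str_query):
--         if ch == '"' and prev != '\\':
--             if pending is None:
--                 pending = i
--             else:
--                 result.append((pending, i))
--                 pending = None
--         prev = ch
--     if pending is not None:
--         raise ValueError("The query has an odd number of non-scaped quotes: " + str_query)
--     return result
-- ===== Notes on version B (the rewrite author's own statement) =====
-- stated objective: simpler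
-- what changed: Replaced A's two-phase approach (collect all unescaped quote positions by indexing back into the string, then a second index loop pairing them) with a single pass that tracks the previous character and one pending opening-quote index, emitting each pair as its closing quote is seen.
import Mathlib
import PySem

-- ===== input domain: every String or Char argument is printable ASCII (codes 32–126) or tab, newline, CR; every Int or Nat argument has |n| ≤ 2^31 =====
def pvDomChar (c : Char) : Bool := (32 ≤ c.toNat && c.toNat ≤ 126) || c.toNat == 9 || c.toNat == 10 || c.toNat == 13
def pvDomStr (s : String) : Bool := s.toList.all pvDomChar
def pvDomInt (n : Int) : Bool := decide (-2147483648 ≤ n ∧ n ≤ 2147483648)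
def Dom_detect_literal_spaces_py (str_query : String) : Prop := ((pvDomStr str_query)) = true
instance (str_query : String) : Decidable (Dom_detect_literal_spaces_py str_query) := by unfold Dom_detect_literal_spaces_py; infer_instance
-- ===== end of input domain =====

-- B fuses A's two phases (collect all unescaped quote positions, then pair them in a
-- second index loop) into one pass tracking the previous character and a pending
-- opening-quote index; objective: simpler.


-- ===== PORT A =====
-- the 'for char in str_query' loop building `indexes`; `full` is the whole string
-- (A indexes back into it with str_query[index - 1])
def aCollect (full : List Char) : List Char → Int → List Int
  | [], _ => []
  | c :: rest, index =>
    if c = '"' then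
      if index = 0 then index :: aCollect full rest (index + 1)
      else if PySem.List.pyGet? full (index - 1) ≠ some '\\' then
        index :: aCollect full rest (index + 1)
      else aCollect full rest (index + 1)
    else aCollect full rest (index + 1)

-- the 'while i < len(indexes)' pairing loop (only reached with an even-length list;
-- on odd length Python raised earlier — outside Pre_)
def pairUp : List Int → List (Int × Int)
  | a :: b :: rest => (a, b) :: pairUp rest
  | _ => []

def detect_literal_spaces_py (str_query : String) : List (Int × Int) :=
  let indexes := aCollect str_query.toList str_query.toList 0
  -- 'if len(indexes) % 2 != 0: raise ValueError(...)' — excluded by Pre_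
  -- 'if len(indexes) == 0: return []' — pairUp [] = [] covers it
  pairUp indexes

-- ===== PORT B =====
-- single pass: prev = previous character, pending = unclosed opening quote index
def bLoop : List Char → Int → Option Char → Option Int → List (Int × Int) → List (Int × Int)
  | [], _, _, _, res => res  -- pending ≠ none here means Python raises — outside Pre_
  | c :: rest, i, prev, pending, res =>
    if c = '"' ∧ prev ≠ some '\\' then
      match pending with
      | none => bLoop rest (i + 1) (some c) (some i) res
      | some p => bLoop rest (i + 1) (some c) none (res ++ [(p, i)])
    else bLoop rest (i + 1) (some c) pending res

def detect_literal_spaces_py_alt (str_query : String) : List (Int × Int) :=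
  bLoop str_query.toList 0 none none []

-- ===== PRECONDITION & SPEC =====
-- Pre_ excludes exactly the inputs with an odd number of unescaped quotes, on which
-- Python A (and B) raise ValueError.
def Pre_detect_literal_spaces_py (str_query : String) : Prop :=
  ((List.range str_query.toList.length).filter (fun i =>
      str_query.toList[i]? == some '"' &&
        (i == 0 || str_query.toList[i - 1]? != some '\\'))).length % 2 = 0
instance (str_query : String) : Decidable (Pre_detect_literal_spaces_py str_query) := by
  unfold Pre_detect_literal_spaces_py; infer_instance
def pvWitness_detect_literal_spaces_py : String := "say \"hi\" to \"x\""
def Spec_detect_literal_spaces_py (str_query : String) (out : List (Int × Int)) : Prop := out = detect_literal_spaces_py_alt str_query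
instance (str_query : String) (out : List (Int × Int)) : Decidable (Spec_detect_literal_spaces_py str_query out) := by unfold Spec_detect_literal_spaces_py; infer_instance

-- ===== CLAIM (what is proved, stated in full; the proofs are below) =====
def Claim_equal_detect_literal_spaces_py : Prop := ∀ (str_query : String), Dom_detect_literal_spaces_py str_query → Pre_detect_literal_spaces_py str_query → Spec_detect_literal_spaces_py str_query (detect_literal_spaces_py str_query)

-- ===== LEMMAS AND PROOFS =====

-- pairUp with an optional leading pending element: the shape of B's (pending, res) state
def pairUpP : Option Int → List Int → List (Int × Int)
  | none, l => pairUp l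
  | some _, [] => []
  | some p, a :: rest => (p, a) :: pairUp rest

theorem pairUp_cons (i : Int) (l : List Int) : pairUp (i :: l) = pairUpP (some i) l := by
  cases l <;> simp [pairUp, pairUpP]

theorem pairUpP_nil (pending : Option Int) : pairUpP pending [] = [] := by
  cases pending <;> simp [pairUpP, pairUp]

theorem loop_eq (s : List Char) :
    ∀ (rest pre : List Char) (i : Int) (prev : Option Char) (pending : Option Int)
      (res : List (Int × Int)),
      s = pre ++ rest → i = (pre.length : Int) → prev = pre.getLast? →
      bLoop rest i prev pending res = res ++ pairUpP pending (aCollect s rest i) := by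
  intro rest
  induction rest with
  | nil => intro pre i prev pending res _ _ _; simp [bLoop, aCollect, pairUpP_nil]
  | cons c rest ih =>
    intro pre i prev pending res hs hi hprev
    have hstep : ∀ pending' res',
        bLoop rest (i + 1) (some c) pending' res' =
          res' ++ pairUpP pending' (aCollect s rest (i + 1)) := by
      intro pending' res'
      refine ih (pre ++ [c]) (i + 1) (some c) pending' res' ?_ ?_ ?_
      · simpa using hs
      · simp [hi]
      · simp
    -- A's quote condition equals B's prev-based condition
    have hcond : ((i = 0 ∨ PySem.List.pyGet? s (i - 1) ≠ some '\\') ↔ prev ≠ some '\\') := by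
      rcases List.eq_nil_or_concat pre with hpre | ⟨pre', x, hpre⟩
      · subst hpre
        simp at hi hprev
        simp [hi, hprev]
      · subst hpre
        have hi1 : i - 1 = ((pre'.length : Nat) : Int) := by
          simp at hi; omega
        have hget : PySem.List.pyGet? s (i - 1) = some x := by
          rw [hs, hi1, PySem.List.pyGet?_natCast]
          simp only [List.concat_eq_append, List.append_assoc, List.singleton_append]
          simp
        have hi0 : ¬ i = 0 := by
          simp at hi; omega
        rw [hget, hprev]
        simp [hi0]
    by_cases hc : c = '"'
    · by_cases hq : prev ≠ some '\\'
      · -- unescaped quote: both take it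
        have hA : aCollect s (c :: rest) i = i :: aCollect s rest (i + 1) := by
          rcases hcond.mpr hq with h0 | h1
          · simp [aCollect, hc, h0]
          · by_cases h0 : i = 0
            · simp [aCollect, hc, h0]
            · simp [aCollect, hc, h0, h1]
        rw [hA]
        cases pending with
        | none =>
          simp only [bLoop]
          rw [if_pos (show c = '"' ∧ prev ≠ some '\\' from ⟨hc, hq⟩)]
          rw [hstep, pairUpP, pairUp_cons]
        | some p =>
          simp only [bLoop]
          rw [if_pos (show c = '"' ∧ prev ≠ some '\\' from ⟨hc, hq⟩)]
          rw [hstep, pairUpP]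
          simp [pairUpP]
      · -- escaped quote: both skip
        simp only [ne_eq, not_not] at hq
        have h1 : PySem.List.pyGet? s (i - 1) = some '\\' := by
          by_contra hne
          have := hcond.mp (Or.inr hne)
          exact this hq
        have h0 : ¬ i = 0 := by
          intro h0
          exact (hcond.mp (Or.inl h0)) hq
        have hA : aCollect s (c :: rest) i = aCollect s rest (i + 1) := by
          simp [aCollect, hc, h0, h1]
        rw [hA]
        have : ¬ (c = '"' ∧ prev ≠ some '\\') := by simp [hq]
        simp only [bLoop, if_neg this]
        exact hstep pending res
    · -- not a quote: both skip
      have hA : aCollect s (c :: rest) i = aCollect s rest (i + 1) := by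
        simp [aCollect, hc]
      rw [hA]
      have : ¬ (c = '"' ∧ prev ≠ some '\\') := by simp [hc]
      simp only [bLoop, if_neg this]
      exact hstep pending res

-- ===== VERDICT (by name: the statement is the Claim_ definition above) =====
theorem detect_literal_spaces_py_spec : Claim_equal_detect_literal_spaces_py := by
  intro s _ _
  unfold Spec_detect_literal_spaces_py detect_literal_spaces_py detect_literal_spaces_py_alt
  rw [loop_eq s.toList s.toList [] 0 none none [] (by simp) (by simp) (by simp)]
  simp [pairUpP]
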